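-- pv_equiv track=rewrite | github.com/Kesendo/R-equals-C-Psi-squared | simulations/structure_points_large_n.py | y_junction_bonds
-- ===== SOURCE A (Python) =====
-- def y_junction_bonds(N):
--     """Three arms of roughly equal length meeting at site 0."""
--     bonds = []
--     arm_len = (N - 1) // 3
--     site = 1
--     for arm in range(3):
--         prev = 0
--         for _ in range(arm_len):
--             bonds.append((prev, site))
--             prev = site
--             site += 1
--     # remaining sites on last arm
--     while site < N:
--         bonds.append((prev, site))
--         prev = site
--         site += 1
--     return bonds
-- ===== SOURCE B (Python) =====
-- def y_junction_bonds(N):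
--     """Three arms of roughly equal length meeting at site 0."""
--     arm_len = (N - 1) // 3
--     starts = {1, 1 + arm_len, 1 + 2 * arm_len}
--     return [(0 if s in starts else s - 1, s) for s in range(1, N)]
-- ===== Notes on version B (the rewrite author's own statement) =====
-- stated objective: simpler
-- what changed: Replaces A's three sequential arm loops with manual prev-reset plus a trailing while loop by a single flat comprehension over range(1, N) that picks each edge's predecessor (0 at an arm start, s-1 otherwise) via a precomputed set of the three arm-start sites.
import Mathlib
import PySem

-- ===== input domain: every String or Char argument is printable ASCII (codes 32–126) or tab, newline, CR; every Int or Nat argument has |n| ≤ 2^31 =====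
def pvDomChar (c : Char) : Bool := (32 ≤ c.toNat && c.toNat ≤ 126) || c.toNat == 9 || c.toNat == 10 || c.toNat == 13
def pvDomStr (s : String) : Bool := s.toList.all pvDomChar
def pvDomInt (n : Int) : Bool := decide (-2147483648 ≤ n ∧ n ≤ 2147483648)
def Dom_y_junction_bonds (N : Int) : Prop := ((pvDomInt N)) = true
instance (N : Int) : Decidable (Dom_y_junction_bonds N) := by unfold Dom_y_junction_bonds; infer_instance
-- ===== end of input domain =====

-- B replaces A's three nested arm loops (with a manual prev reset) by one flat pass over
-- range(1, N) deriving each predecessor from membership in a precomputed junction-start set (objective: simpler).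


-- ===== PORT A =====
-- 'while site < N: bonds.append((prev, site)); prev = site; site += 1'
def yWhile (N prev site : Int) (bonds : List (Int × Int)) : List (Int × Int) :=
  if site < N then yWhile N site (site + 1) (bonds ++ [(prev, site)]) else bonds
termination_by (N - site).toNat
decreasing_by omega

-- state is (bonds, prev, site); the outer loop 'for arm in range(3)' resets prev to 0,
-- the inner loop 'for _ in range(arm_len)' appends one bond and advances prev/site.
def y_junction_bonds (N : Int) : List (Int × Int) :=
  let arm_len := PySem.Int.floordiv (N - 1) 3
  let st := (PySem.List.pyRange 0 3 1).foldl
      (fun (st : List (Int × Int) × Int × Int) _ =>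
        (PySem.List.pyRange 0 arm_len 1).foldl
          (fun (t : List (Int × Int) × Int × Int) _ =>
            (t.1 ++ [(t.2.1, t.2.2)], t.2.2, t.2.2 + 1))
          (st.1, 0, st.2.2))
      ([], 0, 1)
  yWhile N st.2.1 st.2.2 st.1

-- ===== PORT B =====
def y_junction_bonds_alt (N : Int) : List (Int × Int) :=
  let arm_len := PySem.Int.floordiv (N - 1) 3
  let starts : PySem.Set Int := PySem.Set.ofList [1, 1 + arm_len, 1 + 2 * arm_len]
  (PySem.List.pyRange 1 N 1).map
    (fun s => (if PySem.Set.contains starts s then 0 else s - 1, s))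

-- ===== PRECONDITION & SPEC =====
def Spec_y_junction_bonds (N : Int) (out : List (Int × Int)) : Prop := out = y_junction_bonds_alt N
instance (N : Int) (out : List (Int × Int)) : Decidable (Spec_y_junction_bonds N out) := by unfold Spec_y_junction_bonds; infer_instance

-- ===== CLAIM (what is proved, stated in full; the proofs are below) =====
def Claim_equal_y_junction_bonds : Prop := ∀ (N : Int), Dom_y_junction_bonds N → Spec_y_junction_bonds N (y_junction_bonds N)

-- ===== LEMMAS AND PROOFS =====

-- the chain of bonds emitted by n append steps starting from (prev, site)
def seg : Int → Int → Nat → List (Int × Int)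
  | _, _, 0 => []
  | prev, site, n + 1 => (prev, site) :: seg site (site + 1) n

-- the value of 'prev' after n append steps starting from (prev, site)
def endPrev : Int → Int → Nat → Int
  | p, _, 0 => p
  | _, s, n + 1 => s + n

lemma endPrev_shift (prev site : Int) (n : Nat) :
    endPrev site (site + 1) n = endPrev prev site (n + 1) := by
  cases n with
  | zero => simp [endPrev]
  | succ m => simp [endPrev]; ring

lemma seg_shift (prev site : Int) (n : Nat) :
    (prev, site) :: seg site (site + 1) n = seg prev site (n + 1) := rfl

lemma endPrev_pos (p s : Int) (n : Nat) (hn : n ≠ 0) : endPrev p s n = s + n - 1 := by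
  cases n with
  | zero => exact absurd rfl hn
  | succ k => simp [endPrev]; ring

lemma innerFold (l : List Int) : ∀ (bonds : List (Int × Int)) (prev site : Int),
    l.foldl (fun (t : List (Int × Int) × Int × Int) _ =>
        (t.1 ++ [(t.2.1, t.2.2)], t.2.2, t.2.2 + 1)) (bonds, prev, site)
      = (bonds ++ seg prev site l.length, endPrev prev site l.length, site + l.length) := by
  induction l with
  | nil => intro bonds prev site; simp [seg, endPrev]
  | cons x xs ih =>
    intro bonds prev site
    simp only [List.foldl_cons, List.length_cons]
    rw [ih]
    refine Prod.ext ?_ (Prod.ext ?_ ?_)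
    · simp [← seg_shift]
    · simp [endPrev_shift prev site xs.length]
    · simp; ring

lemma yWhile_eq (N : Int) : ∀ (m : Nat) (prev site : Int) (bonds : List (Int × Int)),
    m = (N - site).toNat →
    yWhile N prev site bonds = bonds ++ seg prev site m := by
  intro m
  induction m with
  | zero =>
    intro prev site bonds h
    rw [yWhile]
    have : ¬ site < N := by omega
    simp [this, seg]
  | succ n ih =>
    intro prev site bonds h
    rw [yWhile]
    have hlt : site < N := by omega
    simp only [if_pos hlt]
    rw [ih site (site + 1) _ (by omega)]
    simp [← seg_shift]

-- a flat pass over [s, s+n) where every site maps to (t-1, t) produces the chain seg (s-1) s n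
lemma map_seg_tail (g : Int → Int × Int) : ∀ (n : Nat) (s : Int),
    (∀ t : Int, s ≤ t → t < s + n → g t = (t - 1, t)) →
    (PySem.List.pyRange s (s + n) 1).map g = seg (s - 1) s n := by
  intro n
  induction n with
  | zero => intro s _; rw [PySem.List.pyRange_one_eq_nil (by omega)]; simp [seg]
  | succ k ih =>
    intro s hg
    rw [PySem.List.pyRange_one_cons (by omega)]
    simp only [List.map_cons]
    have h1 : (PySem.List.pyRange (s + 1) (s + (k + 1 : Nat)) 1).map g = seg s (s + 1) k := by
      have := ih (s + 1) (fun t h1 h2 => hg t (by omega) (by push_cast at h2 ⊢; omega))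
      rw [show ((s + 1) + (k : Int)) = (s + ((k : Nat) + 1 : Int)) by push_cast; ring] at this
      rw [show (s + ((k + 1 : Nat) : Int)) = (s + ((k : Nat) + 1 : Int)) by push_cast; ring]
      simpa using this
    rw [h1, hg s (by omega) (by omega)]
    simp [seg]

-- a flat pass over [s, s+n) whose first site maps to (0, s) produces an arm seg 0 s n
lemma map_seg_arm (g : Int → Int × Int) (n : Nat) (s : Int)
    (h0 : g s = (0, s))
    (hg : ∀ t : Int, s + 1 ≤ t → t < s + n → g t = (t - 1, t)) :
    (PySem.List.pyRange s (s + n) 1).map g = seg 0 s n := by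
  cases n with
  | zero => rw [PySem.List.pyRange_one_eq_nil (by omega)]; simp [seg]
  | succ k =>
    rw [PySem.List.pyRange_one_cons (by omega)]
    simp only [List.map_cons, h0]
    have h1 : (PySem.List.pyRange (s + 1) (s + (k + 1 : Nat)) 1).map g = seg s (s + 1) k := by
      have := map_seg_tail g k (s + 1) (fun t h1 h2 => hg t (by omega) (by push_cast at h2 ⊢; omega))
      rw [show ((s + 1) + (k : Int)) = (s + ((k : Nat) + 1 : Int)) by push_cast; ring] at this
      rw [show (s + ((k + 1 : Nat) : Int)) = (s + ((k : Nat) + 1 : Int)) by push_cast; ring]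
      simpa [show ((s + 1) - 1 : Int) = s by ring] using this
    rw [h1]
    simp [seg]

lemma fB_eq (a t : Int) :
    (if PySem.Set.contains (PySem.Set.ofList [1, 1 + a, 1 + 2 * a]) t then (0 : Int) else t - 1, t)
      = (if t = 1 ∨ t = 1 + a ∨ t = 1 + 2 * a then (0 : Int) else t - 1, t) := by
  have hmem : PySem.Set.contains (PySem.Set.ofList [1, 1 + a, 1 + 2 * a]) t
      = decide (t = 1 ∨ t = 1 + a ∨ t = 1 + 2 * a) := by
    have : t ∈ PySem.Set.ofList [1, 1 + a, 1 + 2 * a] ↔ (t = 1 ∨ t = 1 + a ∨ t = 1 + 2 * a) := by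
      rw [PySem.Set.mem_ofList]; simp
    simp [PySem.Set.contains, this]
  rw [hmem]
  by_cases h : t = 1 ∨ t = 1 + a ∨ t = 1 + 2 * a <;> simp [h]

-- ===== VERDICT (by name: the statement is the Claim_ definition above) =====
theorem y_junction_bonds_spec : Claim_equal_y_junction_bonds := by
  intro N _
  unfold Spec_y_junction_bonds y_junction_bonds y_junction_bonds_alt
  set a : Int := PySem.Int.floordiv (N - 1) 3 with ha
  -- the A side, reduced to segs
  have hrange3 : PySem.List.pyRange 0 3 1 = [0, 1, 2] := by decide
  have hLlen : (PySem.List.pyRange 0 a 1).length = a.toNat := by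
    simpa using PySem.List.length_pyRange_one 0 a
  set L : Nat := a.toNat with hL
  -- evaluate the three unrolled arms
  rw [hrange3]
  simp only [List.foldl_cons, List.foldl_nil]
  rw [innerFold]
  simp only []
  rw [innerFold]
  simp only []
  rw [innerFold]
  simp only [hLlen]
  rw [yWhile_eq N ((N - (1 + L + L + L)).toNat) _ _ _ rfl]
  -- abbreviate B's per-site function
  set g : Int → Int × Int := fun s =>
    (if PySem.Set.contains (PySem.Set.ofList [1, 1 + a, 1 + 2 * a]) s then (0 : Int) else s - 1, s)
    with hgdef
  have hg : ∀ t : Int, g t = (if t = 1 ∨ t = 1 + a ∨ t = 1 + 2 * a then (0 : Int) else t - 1, t) :=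
    fun t => fB_eq a t
  -- floordiv facts
  have hfd : a = (N - 1).fdiv 3 := rfl
  have hediv : a = (N - 1) / 3 := by rw [hfd, Int.fdiv_eq_ediv]; norm_num
  by_cases hN : N ≤ 1
  · -- empty output on both sides
    have haneg : a ≤ 0 := by omega
    have hL0 : L = 0 := by omega
    have hM : (N - (1 + (L : Int) + L + L)).toNat = 0 := by omega
    rw [PySem.List.pyRange_one_eq_nil (by omega)]
    simp [hL0, hM, seg, endPrev, show N.toNat - 1 = 0 from by omega]
  · push_neg at hN
    have ha0 : 0 ≤ a := by omega
    have h3a : 3 * a ≤ N - 1 ∧ N - 1 < 3 * a + 3 := by omega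
    have hLa : (L : Int) = a := by omega
    by_cases hA0 : a = 0
    · -- arm_len = 0: all three 'starts' coincide at site 1; A is one plain chain from 0
      have hL0 : L = 0 := by omega
      have hM : (N - (1 + (L : Int) + L + L)).toNat = (N - 1).toNat := by omega
      have harm : (PySem.List.pyRange 1 N 1).map g = seg 0 1 (N - 1).toNat := by
        have := map_seg_arm g (N - 1).toNat 1
          (by rw [hg]; simp)
          (by intro t h1 h2; rw [hg]; have : ¬ (t = 1 ∨ t = 1 + a ∨ t = 1 + 2 * a) := by omega
              simp [this])
        rw [show ((1 : Int) + ((N - 1).toNat : Int)) = N by omega] at this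
        exact this
      rw [harm]
      simp [hL0, hM, seg, endPrev]
    · -- arm_len ≥ 1: split B's single pass at the three arm starts
      have ha1 : 1 ≤ a := by omega
      have hM : (N - (1 + (L : Int) + L + L)).toNat = (N - (1 + 3 * a)).toNat := by omega
      have hsplit : PySem.List.pyRange 1 N 1
          = PySem.List.pyRange 1 (1 + a) 1 ++ PySem.List.pyRange (1 + a) (1 + 2 * a) 1
            ++ PySem.List.pyRange (1 + 2 * a) (1 + 3 * a) 1 ++ PySem.List.pyRange (1 + 3 * a) N 1 := by
        rw [PySem.List.pyRange_one_append 1 (1 + a) N (by omega) (by omega),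
            PySem.List.pyRange_one_append (1 + a) (1 + 2 * a) N (by omega) (by omega),
            PySem.List.pyRange_one_append (1 + 2 * a) (1 + 3 * a) N (by omega) (by omega)]
        simp [List.append_assoc]
      have harm1 : (PySem.List.pyRange 1 (1 + a) 1).map g = seg 0 1 L := by
        have := map_seg_arm g L 1
          (by rw [hg]; simp)
          (by intro t h1 h2; rw [hg]; rw [hLa] at h2
              have : ¬ (t = 1 ∨ t = 1 + a ∨ t = 1 + 2 * a) := by omega
              simp [this])
        rw [show ((1 : Int) + (L : Int)) = 1 + a by omega] at this
        exact this
      have harm2 : (PySem.List.pyRange (1 + a) (1 + 2 * a) 1).map g = seg 0 (1 + a) L := by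
        have := map_seg_arm g L (1 + a)
          (by rw [hg]; have : (1 + a = 1 ∨ 1 + a = 1 + a ∨ 1 + a = 1 + 2 * a) := by omega
              simp [this])
          (by intro t h1 h2; rw [hg]; rw [hLa] at h2
              have : ¬ (t = 1 ∨ t = 1 + a ∨ t = 1 + 2 * a) := by omega
              simp [this])
        rw [show ((1 + a : Int) + (L : Int)) = 1 + 2 * a by omega] at this
        exact this
      have harm3 : (PySem.List.pyRange (1 + 2 * a) (1 + 3 * a) 1).map g = seg 0 (1 + 2 * a) L := by
        have := map_seg_arm g L (1 + 2 * a)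
          (by rw [hg]; have : (1 + 2 * a = 1 ∨ 1 + 2 * a = 1 + a ∨ 1 + 2 * a = 1 + 2 * a) := by omega
              simp [this])
          (by intro t h1 h2; rw [hg]; rw [hLa] at h2
              have : ¬ (t = 1 ∨ t = 1 + a ∨ t = 1 + 2 * a) := by omega
              simp [this])
        rw [show ((1 + 2 * a : Int) + (L : Int)) = 1 + 3 * a by omega] at this
        exact this
      have htail : (PySem.List.pyRange (1 + 3 * a) N 1).map g
          = seg (3 * a) (1 + 3 * a) (N - (1 + 3 * a)).toNat := by
        have := map_seg_tail g (N - (1 + 3 * a)).toNat (1 + 3 * a)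
          (by intro t h1 h2; rw [hg]
              have : ¬ (t = 1 ∨ t = 1 + a ∨ t = 1 + 2 * a) := by omega
              simp [this])
        rw [show ((1 + 3 * a : Int) + ((N - (1 + 3 * a)).toNat : Int)) = N by omega] at this
        rw [show ((1 + 3 * a : Int) - 1) = 3 * a by ring] at this
        exact this
      rw [hsplit]
      simp only [List.map_append, harm1, harm2, harm3, htail]
      -- now identify A's site bookkeeping (in terms of L) with B's arm starts (in terms of a)
      have hLpos : L ≠ 0 := by omega
      have hprev3 : endPrev 0 (1 + (L : Int) + L) L = 3 * a := by
        rw [endPrev_pos _ _ _ hLpos]; omega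
      rw [hM, hprev3]
      rw [hLa, show (1 : Int) + a + a = 1 + 2 * a from by ring,
          show (1 : Int) + 2 * a + a = 1 + 3 * a from by ring]
      simp [List.append_assoc]
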